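-- pv_equiv track=rewrite | github.com/blzzua/codewars | 7-kyu/minminmax.py | minMinMax
-- ===== SOURCE A (Python) =====
-- def minMinMax(arr):
--     a = min(arr)
--     b = max(arr)
--     res = 0
--     for i in range(a, -~b):
--         if i not in arr:
--             res += i
--             break
--     return [a, res, b]
-- ===== SOURCE B (Python) =====
-- def minMinMax(arr):
--     a = min(arr)
--     b = max(arr)
--     expected = a
--     for v in sorted(set(arr)):
--         if v == expected:
--             expected += 1
--         else:
--             break
--     return [a, expected if expected <= b else 0, b]
-- ===== Notes on version B (the rewrite author's own statement) =====
-- stated objective: alternative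
-- what changed: Replaces the per-candidate membership scan over range(min,max+1) with one ordered pass over sorted(set(arr)) maintaining the next expected value, mapping a fully covered range back to the 0 sentinel via expected > max; it trades repeated list scans for one sort.
import Mathlib
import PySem

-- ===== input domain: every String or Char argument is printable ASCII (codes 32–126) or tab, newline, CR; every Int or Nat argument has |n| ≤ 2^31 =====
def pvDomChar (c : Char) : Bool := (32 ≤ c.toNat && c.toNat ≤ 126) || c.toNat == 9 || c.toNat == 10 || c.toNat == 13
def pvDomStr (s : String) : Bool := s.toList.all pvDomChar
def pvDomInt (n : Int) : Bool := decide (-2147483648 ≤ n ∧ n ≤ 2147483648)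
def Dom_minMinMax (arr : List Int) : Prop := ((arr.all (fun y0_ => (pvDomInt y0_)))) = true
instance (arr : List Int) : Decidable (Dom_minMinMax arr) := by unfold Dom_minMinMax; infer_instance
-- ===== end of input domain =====

-- B replaces A's per-candidate membership scan over range(min,max+1) with a single
-- ordered pass over sorted(set(arr)) tracking the next expected value (alternative algorithm).

-- ===== PORT A =====
-- the 'for i in range(a, -~b): if i not in arr: res += i; break' loop (res starts at 0);
-- the lazy range(a, b+1) is transcribed as a counter i with (b+1-a).toNat remaining steps
def aLoop (arr : List Int) (i : Int) : Nat → Int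
  | 0 => 0
  | n + 1 => if arr.contains i then aLoop arr (i + 1) n else 0 + i

def minMinMax (arr : List Int) : List Int :=
  match PySem.List.min? arr (fun x => x), PySem.List.max? arr (fun x => x) with
  | some a, some b => [a, aLoop arr a (b + 1 - a).toNat, b]
  | _, _ => []

-- ===== PORT B =====
-- the 'for v in sorted(set(arr)): if v == expected: expected += 1 else: break' loop
def bScan (expected : Int) : List Int → Int
  | [] => expected
  | v :: rest => if v = expected then bScan (expected + 1) rest else expected

def minMinMax_alt (arr : List Int) : List Int :=
  match PySem.List.min? arr (fun x => x) with
  | none => []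
  | some a =>
    match PySem.List.max? arr (fun x => x) with
    | none => []
    | some b =>
      let e := bScan a (PySem.List.sorted (PySem.Set.ofList arr) (fun x => x) false)
      [a, if e ≤ b then e else 0, b]

-- ===== PRECONDITION & SPEC =====
-- Pre_: A raises ValueError (min of empty sequence) on []; B raises there too.
def Pre_minMinMax (arr : List Int) : Prop := arr ≠ []
instance (arr : List Int) : Decidable (Pre_minMinMax arr) := by unfold Pre_minMinMax; infer_instance
def pvWitness_minMinMax : List Int := [3, 1, 5]

def Spec_minMinMax (arr : List Int) (out : List Int) : Prop := out = minMinMax_alt arr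
instance (arr : List Int) (out : List Int) : Decidable (Spec_minMinMax arr out) := by unfold Spec_minMinMax; infer_instance

-- ===== CLAIM (what is proved, stated in full; the proofs are below) =====
def Claim_equal_minMinMax : Prop := ∀ (arr : List Int), Dom_minMinMax arr → Pre_minMinMax arr → Spec_minMinMax arr (minMinMax arr)

-- ===== LEMMAS AND PROOFS =====

theorem bScan_ge (s : List Int) : ∀ e : Int, e ≤ bScan e s := by
  induction s with
  | nil => intro e; simp [bScan]
  | cons v rest ih =>
      intro e
      simp only [bScan]
      split
      · exact le_trans (by omega) (ih (e + 1))
      · exact le_refl e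

-- the scan's result is the least integer ≥ e missing from the strictly increasing list s
theorem bScan_spec (s : List Int) (hs : s.Pairwise (· < ·)) :
    ∀ e : Int, (∀ v ∈ s, e ≤ v) →
      bScan e s ∉ s ∧ ∀ m : Int, e ≤ m → m < bScan e s → m ∈ s := by
  induction s with
  | nil => intro e _; constructor
           · simp
           · intro m h1 h2; simp [bScan] at h2; omega
  | cons v rest ih =>
      intro e hge
      have hpair := List.pairwise_cons.mp hs
      simp only [bScan]
      by_cases hv : v = e
      · subst hv
        rw [if_pos rfl]
        have hge' : ∀ w ∈ rest, v + 1 ≤ w := by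
          intro w hw
          have := hpair.1 w hw
          omega
        obtain ⟨h1, h2⟩ := ih hpair.2 (v + 1) hge'
        refine ⟨?_, ?_⟩
        · intro hmem
          rcases List.mem_cons.mp hmem with h | h
          · have := bScan_ge rest (v + 1); omega
          · exact h1 h
        · intro m hm1 hm2
          by_cases hme : m = v
          · simp [hme]
          · exact List.mem_cons_of_mem v (h2 m (by omega) hm2)
      · simp only [if_neg hv]
        refine ⟨?_, ?_⟩
        · intro hmem
          rcases List.mem_cons.mp hmem with h | h
          · exact hv h.symm
          · have h1 := hpair.1 _ h
            have h2 := hge v (List.mem_cons_self ..)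
            omega
        · intro m h1 h2; omega

-- A's loop returns the first missing element if reached within n steps from a, else 0,
-- where r is the least integer ≥ a missing from arr
theorem aLoop_spec (arr : List Int) (r : Int) (hr : r ∉ arr) :
    ∀ (n : Nat) (a : Int), a ≤ r →
      (∀ m : Int, a ≤ m → m < r → m ∈ arr) →
      aLoop arr a n = if r < a + n then r else 0 := by
  intro n
  induction n with
  | zero =>
      intro a har hall
      simp only [aLoop]
      rw [if_neg (by push_cast; omega)]
  | succ n ih =>
      intro a har hall
      simp only [aLoop]
      by_cases hmem : a ∈ arr
      · rw [if_pos (by simpa using hmem)]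
        have hne : r ≠ a := fun h => hr (h ▸ hmem)
        rw [ih (a + 1) (by omega) (fun m h1 h2 => hall m (by omega) h2)]
        have : (r < a + 1 + (n : Int)) ↔ (r < a + ((n : Nat) + 1 : Nat)) := by push_cast; omega
        by_cases h : r < a + 1 + (n : Int)
        · rw [if_pos h, if_pos (by omega)]
        · rw [if_neg h, if_neg (by push_cast at h ⊢; omega)]
      · rw [if_neg (by simpa using hmem)]
        have hra : r = a := by
          by_contra h
          exact hmem (hall a le_rfl (by omega))
        rw [if_pos (by omega), hra]
        omega

-- ===== VERDICT (by name: the statement is the Claim_ definition above) =====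
theorem minMinMax_spec : Claim_equal_minMinMax := by
  intro arr _ hpre
  unfold Spec_minMinMax minMinMax minMinMax_alt
  obtain ⟨a, ha⟩ : ∃ a, PySem.List.min? arr (fun x => x) = some a := by
    cases h : PySem.List.min? arr (fun x => x) with
    | none => exact absurd ((PySem.List.min?_eq_none_iff _ _).mp h) hpre
    | some a => exact ⟨a, rfl⟩
  obtain ⟨b, hb⟩ : ∃ b, PySem.List.max? arr (fun x => x) = some b := by
    cases h : PySem.List.max? arr (fun x => x) with
    | none => exact absurd ((PySem.List.max?_eq_none_iff _ _).mp h) hpre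
    | some b => exact ⟨b, rfl⟩
  rw [ha, hb]
  simp only [List.cons.injEq, and_true, true_and]
  set s := PySem.List.sorted (PySem.Set.ofList arr) (fun x => x) false with hsdef
  have hmem_s : ∀ v : Int, v ∈ s ↔ v ∈ arr := by
    intro v
    rw [hsdef, PySem.List.mem_sorted, PySem.Set.mem_ofList]
  have hpair : s.Pairwise (· < ·) := by
    rw [hsdef]; exact PySem.List.sorted_ofList_pairwise_lt arr
  have hmin : ∀ v ∈ s, a ≤ v := fun v hv =>
    PySem.List.min?_isMin ha v ((hmem_s v).mp hv)
  set r := bScan a s with hrdef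
  obtain ⟨hnot, hall⟩ := bScan_spec s hpair a hmin
  have hr_arr : r ∉ arr := fun h => hnot ((hmem_s r).mpr h)
  have hall' : ∀ m : Int, a ≤ m → m < r → m ∈ arr := fun m h1 h2 =>
    (hmem_s m).mp (hall m h1 h2)
  have hab : a ≤ b := by
    have hbmem := PySem.List.max?_mem hb
    exact PySem.List.min?_isMin ha b hbmem
  rw [aLoop_spec arr r hr_arr (b + 1 - a).toNat a (bScan_ge s a) hall']
  have hcast : (a + ((b + 1 - a).toNat : Int)) = b + 1 := by omega
  rw [hcast]
  by_cases h : r ≤ b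
  · rw [if_pos (by omega), if_pos h]
  · rw [if_neg (by omega), if_neg h]
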